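-- pv_equiv track=rewrite | github.com/bgirot/School-Projects | Projet/puissance_4.py | a_gagne_diag1
-- ===== SOURCE A (Python) =====
-- def a_gagne_diag1(grille,joueur) :
--     """
--         Étant donné une grille et un joueur, retourne True si ce joueur a gagné en diagonale montante
--
--         :param grille: grille à tester
--         :param joueur: joueur dont la victoire est à vérifier
--         :type grille: list
--         :type joueur: int
--         :return: ce joueur a-t-il gagné en diagonale montante ?
--         :rtype: bool
--
--         .. seealso:: a_gagne_vert(grille,joueur), a_gagne_hor(grille,joueur), a_gagne_diag2(grille,joueur)
--         .. note:: cette méthode ne fonctionne que dans des grille de valeur supérieure à 4x4 (même si évidemment une diagonale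
--                   de 4 n'existe pas dans une grille de telles dimensions), donc on ajoute une simplement une condition sur la
--                   taille de la grille
--
--         :Example:
--
--         >>> a_gagne_diag1([[1,2,1,1,2,1,1],[2,1,2,2,1,2,2],[0,2,1,1,0,1,2],[0,1,2,1,0,0,0],[0,1,2,1,0,0,0],[0,0,0,0,0,0,0]],1)
--         True
--         >>> a_gagne_diag1([[1,1,2,2,2,1,1],[2,1,1,2,2,1,2],[0,2,1,1,0,2,2],[0,1,2,2,0,0,2],[0,1,2,1,0,0,0],[0,0,0,0,0,0,0]],2)
--         True
--         >>> a_gagne_diag1([[1,1,2,1,2,1,1],[2,1,2,2,1,2,2],[0,2,1,1,0,1,2],[0,1,2,2,0,0,0],[0,1,2,1,0,0,0],[0,0,0,0,0,0,0]],2)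
--         False
--     """
--     # Retourne automatiquement False si les dimensions de la grille sont inférieures à 4x4 pcq il n'y a pas de diagonales dans une grille de telles dimensions
--     if len(grille[0]) < 4 or len(grille) < 4:
--         return False
--
--     # Chaque fois qu'on voit un pion du joueur on teste sa diagonale montante
--     for line in range(len(grille)-3):               # On réduit la grille de recherche aux départs possibles de diagonales
--         for column in range(len(grille[0])-3):      # Idem
--             if grille[line][column] == joueur:
--                 if grille[line+1][column+1] == grille[line+2][column+2] == grille[line+3][column+3] == joueur:
--                     return True
--     return False
-- ===== SOURCE B (Python) =====
-- def a_gagne_diag1(grille, joueur):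
--     # Same early size guard as the original (grille[0] on an empty grid raises IndexError).
--     rows = len(grille)
--     cols = len(grille[0])
--     if cols < 4 or rows < 4:
--         return False
--     # Walk each rising diagonal once from its topmost/leftmost cell, keeping a
--     # running count of consecutive cells equal to joueur.
--     starts = [(0, c) for c in range(cols)] + [(r, 0) for r in range(1, rows)]
--     for r, c in starts:
--         run = 0
--         while r < rows and c < cols:
--             run = run + 1 if grille[r][c] == joueur else 0
--             if run == 4:
--                 return True
--             r += 1
--             c += 1
--     return False
-- ===== Notes on version B (the rewrite author's own statement) =====
-- stated objective: alternative
-- what changed: Instead of testing a fixed 4-cell window at every possible start cell, B walks each rising diagonal once from its edge start, maintaining a running count of consecutive cells equal to joueur; each cell is read once instead of up to four times.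
-- outside the precondition, e.g. on a_gagne_diag1([], 1): A raises IndexError, B raises IndexError
import Mathlib
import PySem

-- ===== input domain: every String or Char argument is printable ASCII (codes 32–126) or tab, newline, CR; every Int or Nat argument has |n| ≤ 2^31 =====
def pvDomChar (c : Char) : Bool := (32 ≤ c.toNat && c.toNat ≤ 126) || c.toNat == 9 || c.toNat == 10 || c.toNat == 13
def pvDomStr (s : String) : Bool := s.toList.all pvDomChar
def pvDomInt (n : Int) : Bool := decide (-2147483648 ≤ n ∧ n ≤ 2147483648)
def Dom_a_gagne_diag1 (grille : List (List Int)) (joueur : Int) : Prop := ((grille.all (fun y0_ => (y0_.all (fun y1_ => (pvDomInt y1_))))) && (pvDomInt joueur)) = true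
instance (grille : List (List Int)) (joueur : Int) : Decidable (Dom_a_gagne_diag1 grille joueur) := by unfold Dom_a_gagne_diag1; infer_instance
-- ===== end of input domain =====

-- B walks each rising diagonal once with a running streak counter instead of testing a
-- fixed 4-cell window at every start cell (objective: alternative algorithm, same cost class).

-- grille[r][c]: under Pre_ (non-empty rectangular grid) every access made by either
-- program is in range, so plain getD with defaults is exact there.
def pvCell (g : List (List Int)) (r c : Nat) : Int := (g.getD r []).getD c 0

-- ===== PORT A =====
def a_gagne_diag1 (grille : List (List Int)) (joueur : Int) : Bool :=
  -- len(grille[0]) raises IndexError on an empty grid: excluded by Pre_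
  if (grille.headD []).length < 4 ∨ grille.length < 4 then false
  else
    -- for line in range(len(grille)-3): for column in range(len(grille[0])-3): early return True
    (List.range (grille.length - 3)).any (fun line =>
      (List.range ((grille.headD []).length - 3)).any (fun column =>
        pvCell grille line column == joueur &&
        (pvCell grille (line+1) (column+1) == pvCell grille (line+2) (column+2) &&
         pvCell grille (line+2) (column+2) == pvCell grille (line+3) (column+3) &&
         pvCell grille (line+3) (column+3) == joueur)))

-- ===== PORT B =====
-- the while loop of Source B: walk one diagonal, run = current streak, early True at run == 4
def pvDiagRun (g : List (List Int)) (j : Int) (rows cols : Nat) (r c run : Nat) : Bool :=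
  if h : r < rows ∧ c < cols then
    let run' := if pvCell g r c == j then run + 1 else 0
    if run' == 4 then true
    else pvDiagRun g j rows cols (r+1) (c+1) run'
  else false
termination_by rows - r
decreasing_by omega

def a_gagne_diag1_alt (grille : List (List Int)) (joueur : Int) : Bool :=
  let rows := grille.length
  let cols := (grille.headD []).length
  if cols < 4 ∨ rows < 4 then false
  else
    let starts := (List.range cols).map (fun c => ((0 : Nat), c)) ++
                  (List.range (rows - 1)).map (fun r => (r + 1, (0 : Nat)))
    starts.any (fun rc => pvDiagRun grille joueur rows cols rc.1 rc.2 0)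

-- ===== PRECONDITION & SPEC =====
-- Pre_ excludes the empty grid (A raises IndexError on grille[0]) and, when the grid is at
-- least 4x4 by A's measure, grids with a row shorter than row 0, on which A raises
-- IndexError except in corner cases where the short row is never reached (an early True).
def Pre_a_gagne_diag1 (grille : List (List Int)) (joueur : Int) : Prop :=
  grille ≠ [] ∧
  ((grille.headD []).length < 4 ∨ grille.length < 4 ∨
    ∀ row ∈ grille, (grille.headD []).length ≤ row.length)
instance (grille : List (List Int)) (joueur : Int) : Decidable (Pre_a_gagne_diag1 grille joueur) := by unfold Pre_a_gagne_diag1; infer_instance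

def pvWitness_a_gagne_diag1 : List (List Int) × Int :=
  ([[1,2,1,1],[2,1,2,2],[0,2,1,1],[0,1,2,1]], 1)

def Spec_a_gagne_diag1 (grille : List (List Int)) (joueur : Int) (out : Bool) : Prop := out = a_gagne_diag1_alt grille joueur
instance (grille : List (List Int)) (joueur : Int) (out : Bool) : Decidable (Spec_a_gagne_diag1 grille joueur out) := by unfold Spec_a_gagne_diag1; infer_instance

-- ===== CLAIM (what is proved, stated in full; the proofs are below) =====
def Claim_equal_a_gagne_diag1 : Prop := ∀ (grille : List (List Int)) (joueur : Int), Dom_a_gagne_diag1 grille joueur → Pre_a_gagne_diag1 grille joueur → Spec_a_gagne_diag1 grille joueur (a_gagne_diag1 grille joueur)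

-- ===== LEMMAS AND PROOFS =====

-- a 4-in-a-row window starting at (r,c)
def pvWin (g : List (List Int)) (j : Int) (rows cols : Nat) (r c : Nat) : Prop :=
  r + 3 < rows ∧ c + 3 < cols ∧ ∀ k ≤ 3, pvCell g (r+k) (c+k) = j

lemma pvDiagRun_char (g : List (List Int)) (j : Int) (rows cols : Nat) :
    ∀ r c run, run ≤ 3 →
      (pvDiagRun g j rows cols r c run = true ↔
        ((r + (3 - run) < rows ∧ c + (3 - run) < cols ∧ ∀ k ≤ 3 - run, pvCell g (r+k) (c+k) = j)
         ∨ ∃ s, pvWin g j rows cols (r+s) (c+s))) := by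
  simp only [pvWin]
  intro r c run hrun
  generalize hm : rows - r = n
  induction n generalizing r c run with
  | zero =>
    rw [pvDiagRun]
    have hb : ¬ (r < rows ∧ c < cols) := by omega
    simp only [hb, dite_false, Bool.false_eq_true, false_iff]
    rintro (⟨h1, _, _⟩ | ⟨s, h1, _, _⟩) <;> omega
  | succ n ih =>
    have hr : r < rows := by omega
    rw [pvDiagRun]
    by_cases hc : c < cols
    · rw [dif_pos ⟨hr, hc⟩]
      by_cases hm0 : (pvCell g r c == j) = true
      · have hm0' : pvCell g r c = j := beq_iff_eq.mp hm0
        simp only [hm0, if_true]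
        by_cases h3 : run = 3
        · subst h3
          have h4 : ((3 + 1 : Nat) == 4) = true := rfl
          simp only [h4, if_true, true_iff]
          left
          refine ⟨by omega, by omega, ?_⟩
          intro k hk
          have hk0 : k = 0 := by omega
          subst hk0; simpa using hm0'
        · rw [if_neg (show ¬ ((run + 1 : Nat) == 4) = true by simp; omega)]
          rw [ih (r+1) (c+1) (run+1) (by omega) (by omega)]
          constructor
          · rintro (⟨h1, h2, hks⟩ | ⟨s, hw1, hw2, hw3⟩)
            · left
              refine ⟨by omega, by omega, ?_⟩
              intro k hk
              cases k with
              | zero => simpa using hm0'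
              | succ k' =>
                have := hks k' (by omega)
                rwa [show r+1+k' = r+(k'+1) by omega, show c+1+k' = c+(k'+1) by omega] at this
            · right
              exact ⟨s+1, by rw [show r+(s+1) = r+1+s by omega, show c+(s+1) = c+1+s by omega];
                             exact ⟨hw1, hw2, hw3⟩⟩
          · rintro (⟨h1, h2, hks⟩ | ⟨s, hw1, hw2, hw3⟩)
            · left
              refine ⟨by omega, by omega, ?_⟩
              intro k hk
              have := hks (k+1) (by omega)
              rwa [show r+(k+1) = r+1+k by omega, show c+(k+1) = c+1+k by omega] at this
            · cases s with
              | zero =>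
                left
                refine ⟨by omega, by omega, ?_⟩
                intro k hk
                have := hw3 (k+1) (by omega)
                rwa [show r+0+(k+1) = r+1+k by omega, show c+0+(k+1) = c+1+k by omega] at this
              | succ s' =>
                right
                exact ⟨s', by rw [show r+1+s' = r+(s'+1) by omega, show c+1+s' = c+(s'+1) by omega];
                              exact ⟨hw1, hw2, hw3⟩⟩
      · have hm0f : (pvCell g r c == j) = false := by simpa using hm0
        have hm0' : pvCell g r c ≠ j := by simpa using hm0
        simp only [hm0f, Bool.false_eq_true, if_false]
        rw [if_neg (show ¬ ((0 : Nat) == 4) = true by decide)]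
        rw [ih (r+1) (c+1) 0 (by omega) (by omega)]
        constructor
        · rintro (⟨h1, h2, hks⟩ | ⟨s, hw1, hw2, hw3⟩)
          · right
            refine ⟨1, by omega, by omega, ?_⟩
            intro k hk
            have := hks k (by omega)
            rwa [show r+1+k = r+1+k by omega, show c+1+k = c+1+k by omega] at this
          · right
            exact ⟨s+1, by rw [show r+(s+1) = r+1+s by omega, show c+(s+1) = c+1+s by omega];
                           exact ⟨hw1, hw2, hw3⟩⟩
        · rintro (⟨h1, h2, hks⟩ | ⟨s, hw1, hw2, hw3⟩)
          · have := hks 0 (by omega)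
            rw [show r+0 = r by omega, show c+0 = c by omega] at this
            exact absurd this hm0'
          · cases s with
            | zero =>
              have := hw3 0 (by omega)
              rw [show r+0+0 = r by omega, show c+0+0 = c by omega] at this
              exact absurd this hm0'
            | succ s' =>
              right
              exact ⟨s', by rw [show r+1+s' = r+(s'+1) by omega, show c+1+s' = c+(s'+1) by omega];
                            exact ⟨hw1, hw2, hw3⟩⟩
    · have hb : ¬ (r < rows ∧ c < cols) := by omega
      simp only [hb, dite_false, Bool.false_eq_true, false_iff]
      rintro (⟨_, h2, _⟩ | ⟨s, _, h2, _⟩) <;> omega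

lemma pvDiagRun_zero (g : List (List Int)) (j : Int) (rows cols r c : Nat) :
    pvDiagRun g j rows cols r c 0 = true ↔ ∃ s, pvWin g j rows cols (r+s) (c+s) := by
  rw [pvDiagRun_char g j rows cols r c 0 (by omega)]
  constructor
  · rintro (⟨h1, h2, h3⟩ | h)
    · refine ⟨0, ?_⟩
      unfold pvWin
      rw [show r+0 = r from by omega, show c+0 = c from by omega]
      exact ⟨by omega, by omega, fun k hk => h3 k (by omega)⟩
    · exact h
  · exact Or.inr

lemma a_char (grille : List (List Int)) (joueur : Int) :
    a_gagne_diag1 grille joueur = true ↔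
      ∃ l c, pvWin grille joueur grille.length (grille.headD []).length l c := by
  unfold a_gagne_diag1
  simp only [pvWin]
  by_cases hg : (grille.headD []).length < 4 ∨ grille.length < 4
  · rw [if_pos hg]
    simp only [Bool.false_eq_true, false_iff]
    rintro ⟨l, c, h1, h2, _⟩; omega
  · rw [if_neg hg]
    simp only [List.any_eq_true, List.mem_range, Bool.and_eq_true, beq_iff_eq]
    constructor
    · rintro ⟨l, hl, c, hc, h0, ⟨h12, h23⟩, h3⟩
      refine ⟨l, c, by omega, by omega, ?_⟩
      intro k hk
      interval_cases k
      · simpa using h0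
      · exact h12.trans (h23.trans h3)
      · exact h23.trans h3
      · exact h3
    · rintro ⟨l, c, h1, h2, hk⟩
      have e0 := hk 0 (by omega)
      have e1 := hk 1 (by omega)
      have e2 := hk 2 (by omega)
      have e3 := hk 3 (by omega)
      exact ⟨l, by omega, c, by omega, by simpa using e0,
             ⟨e1.trans e2.symm, e2.trans e3.symm⟩, e3⟩

lemma b_char (grille : List (List Int)) (joueur : Int) :
    a_gagne_diag1_alt grille joueur = true ↔
      ∃ l c, pvWin grille joueur grille.length (grille.headD []).length l c := by
  unfold a_gagne_diag1_alt
  dsimp only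
  by_cases hg : (grille.headD []).length < 4 ∨ grille.length < 4
  · rw [if_pos hg]
    simp only [Bool.false_eq_true, false_iff]
    rintro ⟨l, c, hw⟩
    obtain ⟨h1, h2, -⟩ := hw
    omega
  · rw [if_neg hg]
    simp only [List.any_append, Bool.or_eq_true, List.any_map, List.any_eq_true,
               List.mem_range, Function.comp, pvDiagRun_zero]
    constructor
    · rintro (⟨c0, hc0, s, hw⟩ | ⟨r0, hr0, s, hw⟩)
      · exact ⟨0+s, c0+s, hw⟩
      · exact ⟨r0+1+s, 0+s, hw⟩
    · rintro ⟨l, c, hw⟩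
      have hb : l + 3 < grille.length ∧ c + 3 < (grille.headD []).length := ⟨hw.1, hw.2.1⟩
      by_cases hlc : l ≤ c
      · left
        refine ⟨c - l, by omega, l, ?_⟩
        rw [show (0:Nat)+l = l from by omega, show c-l+l = c from by omega]
        exact hw
      · right
        refine ⟨l - c - 1, by omega, c, ?_⟩
        rw [show l-c-1+1+c = l from by omega, show (0:Nat)+c = c from by omega]
        exact hw

-- ===== VERDICT (by name: the statement is the Claim_ definition above) =====
theorem a_gagne_diag1_spec : Claim_equal_a_gagne_diag1 := by
  intro grille joueur _ _
  unfold Spec_a_gagne_diag1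
  rw [Bool.eq_iff_iff, a_char, b_char]
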